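-- pv_equiv track=rewrite | github.com/ramonrduarte/sistema-portas | portas/services/producao.py | _shelf_2d
-- ===== SOURCE A (Python) =====
-- def _shelf_2d(pecas: list, chapa_l: int, chapa_a: int) -> list:
--     """
--     Shelf (strip) packing 2D: empacota peças (largura, altura) em chapas.
--     Ordena por altura desc. Abre nova faixa horizontal quando a largura se esgota.
--     Abre nova chapa quando a altura se esgota.
--     Retorna lista de chapas, cada uma sendo lista de tuplas (largura, altura).
--     """
--     chapas = []
--     chapa_atual = []
--     x = 0
--     y = 0
--     h_faixa = 0
--
--     for l, a in sorted(pecas, key=lambda p: (-p[1], -p[0])):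
--         # Peça não cabe nem em uma chapa vazia — adiciona isolada
--         if l > chapa_l or a > chapa_a:
--             if chapa_atual:
--                 chapas.append(chapa_atual)
--                 chapa_atual = []
--             chapas.append([(l, a)])
--             x = 0
--             y = 0
--             h_faixa = 0
--             continue
--
--         # Não cabe na faixa atual (largura) → nova faixa
--         if h_faixa and x + l > chapa_l:
--             y += h_faixa
--             x = 0
--             h_faixa = 0
--
--         # Não cabe na chapa atual (altura) → nova chapa
--         if y + a > chapa_a:
--             chapas.append(chapa_atual)
--             chapa_atual = []
--             x = 0
--             y = 0
--             h_faixa = 0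
--
--         if not h_faixa:
--             h_faixa = a
--
--         chapa_atual.append((l, a))
--         x += l
--
--     if chapa_atual:
--         chapas.append(chapa_atual)
--
--     return chapas or [[]]
-- ===== SOURCE B (Python) =====
-- def _shelf_2d(pecas: list, chapa_l: int, chapa_a: int) -> list:
--     """Two-phase shelf packing: first group pieces into shelf records
--     (and oversized markers), then pack the shelves into sheets by height."""
--     # Phase 1: cut the sorted stream into shelves / oversized markers.
--     items = []  # ('shelf', pieces, shelf_height) | ('over', piece)
--     shelf, x, h = [], 0, 0
--     for l, a in sorted(pecas, key=lambda p: (-p[1], -p[0])):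
--         if l > chapa_l or a > chapa_a:
--             if shelf:
--                 items.append(('shelf', shelf, h))
--             items.append(('over', (l, a)))
--             shelf, x, h = [], 0, 0
--         elif h and x + l > chapa_l:
--             items.append(('shelf', shelf, h))
--             shelf, x, h = [(l, a)], l, a
--         else:
--             shelf = shelf + [(l, a)]
--             x += l
--             if not h:
--                 h = a
--     if shelf:
--         items.append(('shelf', shelf, h))
--
--     # Phase 2: stack shelves into sheets.
--     chapas, sheet, y = [], [], 0
--     for item in items:
--         if item[0] == 'over':
--             if sheet:
--                 chapas.append(sheet)
--             chapas.append([item[1]])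
--             sheet, y = [], 0
--         else:
--             _, ps, hs = item
--             if y + ps[0][1] > chapa_a:
--                 chapas.append(sheet)
--                 sheet, y = [], 0
--             sheet = sheet + ps
--             y += hs
--     if sheet:
--         chapas.append(sheet)
--     return chapas or [[]]
-- ===== Notes on version B (the rewrite author's own statement) =====
-- stated objective: alternative
-- what changed: A's single cursor loop juggling (chapas, chapa_atual, x, y, h_faixa) at once is replaced by a two-phase pipeline: phase 1 groups the height-sorted pieces into shelf records (pieces, height) plus oversized markers, phase 2 stacks those shelves into sheets by height.
import Mathlib
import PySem

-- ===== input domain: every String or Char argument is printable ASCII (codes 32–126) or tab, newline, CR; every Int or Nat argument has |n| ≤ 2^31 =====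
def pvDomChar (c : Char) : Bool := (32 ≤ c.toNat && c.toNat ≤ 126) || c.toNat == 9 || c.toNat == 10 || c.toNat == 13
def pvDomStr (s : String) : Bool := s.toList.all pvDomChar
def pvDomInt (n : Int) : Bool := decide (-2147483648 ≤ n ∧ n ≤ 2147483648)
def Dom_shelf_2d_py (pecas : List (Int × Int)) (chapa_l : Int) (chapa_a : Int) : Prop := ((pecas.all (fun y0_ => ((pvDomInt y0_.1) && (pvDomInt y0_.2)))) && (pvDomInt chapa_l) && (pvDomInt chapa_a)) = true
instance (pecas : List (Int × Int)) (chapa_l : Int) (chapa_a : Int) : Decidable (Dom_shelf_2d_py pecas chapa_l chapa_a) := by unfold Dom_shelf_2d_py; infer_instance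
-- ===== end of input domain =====

-- B repackages A's single cursor loop as a two-phase pipeline (group pieces into shelf records,
-- then stack shelves into sheets); same return value, objective: alternative decomposition.

-- ===== PORT A =====
-- A's loop body: state (chapas, chapa_atual, x, y, h_faixa)
def shelfAStep (chapa_l chapa_a : Int)
    (st : List (List (Int × Int)) × List (Int × Int) × Int × Int × Int)
    (p : Int × Int) : List (List (Int × Int)) × List (Int × Int) × Int × Int × Int :=
  let chapas := st.1
  let cur := st.2.1
  let x := st.2.2.1
  let y := st.2.2.2.1
  let h := st.2.2.2.2
  if p.1 > chapa_l ∨ p.2 > chapa_a then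
    -- piece fits in no sheet: flush current sheet, add it isolated, reset cursor
    ((if cur ≠ [] then chapas ++ [cur] else chapas) ++ [[p]], [], 0, 0, 0)
  else
    -- width exhausted: new shelf
    let y1 := if h ≠ 0 ∧ x + p.1 > chapa_l then y + h else y
    let x1 := if h ≠ 0 ∧ x + p.1 > chapa_l then 0 else x
    let h1 := if h ≠ 0 ∧ x + p.1 > chapa_l then 0 else h
    -- height exhausted: new sheet
    let chapas2 := if y1 + p.2 > chapa_a then chapas ++ [cur] else chapas
    let cur2 := if y1 + p.2 > chapa_a then ([] : List (Int × Int)) else cur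
    let x2 := if y1 + p.2 > chapa_a then 0 else x1
    let y2 := if y1 + p.2 > chapa_a then 0 else y1
    let h2 := if y1 + p.2 > chapa_a then 0 else h1
    let h3 := if h2 = 0 then p.2 else h2
    (chapas2, cur2 ++ [p], x2 + p.1, y2, h3)

def shelf_2d_py (pecas : List (Int × Int)) (chapa_l : Int) (chapa_a : Int) : List (List (Int × Int)) :=
  let st := (PySem.List.sorted2 pecas (fun q => -q.2) (fun q => -q.1)).foldl
      (shelfAStep chapa_l chapa_a) ([], [], 0, 0, 0)
  let chapas := if st.2.1 ≠ [] then st.1 ++ [st.2.1] else st.1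
  if chapas = [] then [[]] else chapas

-- ===== PORT B =====
-- an item of phase 1: a shelf (its pieces and height) or an oversized piece
inductive ShelfItem where
  | shelf : List (Int × Int) → Int → ShelfItem
  | over  : Int × Int → ShelfItem
deriving DecidableEq, Repr

-- phase 1: cut the sorted stream into shelves / oversized markers
def buildShelves (chapa_l chapa_a : Int) (ps : List (Int × Int))
    (shelf : List (Int × Int)) (x h : Int) : List ShelfItem :=
  match ps with
  | [] => if shelf ≠ [] then [ShelfItem.shelf shelf h] else []
  | p :: rest =>
    if p.1 > chapa_l ∨ p.2 > chapa_a then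
      (if shelf ≠ [] then [ShelfItem.shelf shelf h] else []) ++
        ShelfItem.over p :: buildShelves chapa_l chapa_a rest [] 0 0
    else if h ≠ 0 ∧ x + p.1 > chapa_l then
      ShelfItem.shelf shelf h :: buildShelves chapa_l chapa_a rest [p] p.1 p.2
    else
      buildShelves chapa_l chapa_a rest (shelf ++ [p]) (x + p.1) (if h = 0 then p.2 else h)

-- phase 2: stack shelves into sheets; state (chapas, sheet, y)
-- (a shelf emitted by phase 1 is never empty, so headD mirrors Python's ps[0])
def packStep (chapa_a : Int) (st : List (List (Int × Int)) × List (Int × Int) × Int)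
    (it : ShelfItem) : List (List (Int × Int)) × List (Int × Int) × Int :=
  match it with
  | ShelfItem.over p => ((if st.2.1 ≠ [] then st.1 ++ [st.2.1] else st.1) ++ [[p]], [], 0)
  | ShelfItem.shelf ps hs =>
    let a1 := (ps.headD (0, 0)).2
    let C := if st.2.2 + a1 > chapa_a then st.1 ++ [st.2.1] else st.1
    let S := if st.2.2 + a1 > chapa_a then ([] : List (Int × Int)) else st.2.1
    let y := if st.2.2 + a1 > chapa_a then 0 else st.2.2
    (C, S ++ ps, y + hs)

def shelf_2d_py_alt (pecas : List (Int × Int)) (chapa_l : Int) (chapa_a : Int) : List (List (Int × Int)) :=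
  let items := buildShelves chapa_l chapa_a
      (PySem.List.sorted2 pecas (fun q => -q.2) (fun q => -q.1)) [] 0 0
  let st := items.foldl (packStep chapa_a) ([], [], 0)
  let chapas := if st.2.1 ≠ [] then st.1 ++ [st.2.1] else st.1
  if chapas = [] then [[]] else chapas

-- ===== PRECONDITION & SPEC =====
def Spec_shelf_2d_py (pecas : List (Int × Int)) (chapa_l : Int) (chapa_a : Int) (out : List (List (Int × Int))) : Prop := out = shelf_2d_py_alt pecas chapa_l chapa_a
instance (pecas : List (Int × Int)) (chapa_l : Int) (chapa_a : Int) (out : List (List (Int × Int))) : Decidable (Spec_shelf_2d_py pecas chapa_l chapa_a out) := by unfold Spec_shelf_2d_py; infer_instance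

-- ===== CLAIM (what is proved, stated in full; the proofs are below) =====
def Claim_equal_shelf_2d_py : Prop := ∀ (pecas : List (Int × Int)) (chapa_l : Int) (chapa_a : Int), Dom_shelf_2d_py pecas chapa_l chapa_a → Spec_shelf_2d_py pecas chapa_l chapa_a (shelf_2d_py pecas chapa_l chapa_a)

-- ===== LEMMAS AND PROOFS =====

-- final flushes of the two loops
def flushA (st : List (List (Int × Int)) × List (Int × Int) × Int × Int × Int) :
    List (List (Int × Int)) :=
  if st.2.1 ≠ [] then st.1 ++ [st.2.1] else st.1

def flushB (st : List (List (Int × Int)) × List (Int × Int) × Int) :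
    List (List (Int × Int)) :=
  if st.2.1 ≠ [] then st.1 ++ [st.2.1] else st.1

-- insertion preserves pairwise-ness for a relation compatible with the comparator
lemma insertBy_pairwise {α : Type} (lt : α → α → Bool) (S : α → α → Prop)
    (h1 : ∀ a b, lt a b = true → S a b) (h2 : ∀ a b, lt a b = false → S b a)
    (htr : ∀ a b c, S a b → S b c → S a c)
    (x : α) (ys : List α) (hys : ys.Pairwise S) :
    (PySem.List.insertBy lt x ys).Pairwise S := by
  induction ys with
  | nil => simp [PySem.List.insertBy]
  | cons y ys ih =>
    rcases List.pairwise_cons.mp hys with ⟨hy, hys'⟩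
    by_cases hlt : lt x y = true
    · simp only [PySem.List.insertBy, hlt, if_pos]
      refine List.pairwise_cons.mpr ⟨?_, hys⟩
      intro z hz
      rcases List.mem_cons.mp hz with rfl | hz
      · exact h1 _ _ hlt
      · exact htr _ _ _ (h1 _ _ hlt) (hy _ hz)
    · simp only [PySem.List.insertBy, hlt, if_neg, Bool.not_eq_true]
      refine List.pairwise_cons.mpr ⟨?_, ih hys'⟩
      intro z hz
      rcases (PySem.List.mem_insertBy _ _ _ _).mp hz with rfl | hz
      · exact h2 _ _ (by simpa using hlt)
      · exact hy _ hz
    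
lemma foldl_insertBy_pairwise {α : Type} (lt : α → α → Bool) (S : α → α → Prop)
    (h1 : ∀ a b, lt a b = true → S a b) (h2 : ∀ a b, lt a b = false → S b a)
    (htr : ∀ a b c, S a b → S b c → S a c)
    (xs acc : List α) (hacc : acc.Pairwise S) :
    (xs.foldl (fun acc x => PySem.List.insertBy lt x acc) acc).Pairwise S := by
  induction xs generalizing acc with
  | nil => exact hacc
  | cons x xs ih => exact ih _ (insertBy_pairwise lt S h1 h2 htr x acc hacc)

-- the sorted stream has nonincreasing heights
lemma sorted2_heights (pecas : List (Int × Int)) :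
    (PySem.List.sorted2 pecas (fun q => -q.2) (fun q => -q.1)).Pairwise
      (fun p q : Int × Int => q.2 ≤ p.2) := by
  have h := foldl_insertBy_pairwise
    (fun a b : Int × Int => decide (-a.2 < -b.2) || (!decide (-b.2 < -a.2) && decide (-a.1 < -b.1)))
    (fun p q : Int × Int => q.2 ≤ p.2)
    (by
      intro a b hab
      simp only [Bool.or_eq_true, Bool.and_eq_true, Bool.not_eq_true', decide_eq_true_eq,
        decide_eq_false_iff_not] at hab
      rcases hab with h | ⟨h, _⟩ <;> omega)
    (by
      intro a b hab
      simp only [Bool.or_eq_false_iff, Bool.and_eq_false_iff, decide_eq_false_iff_not] at hab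
      have := hab.1
      omega)
    (by intro a b c h1 h2; omega)
    pecas [] List.Pairwise.nil
  exact h

-- the simulation: A's cursor loop vs phase1 feeding phase2, with A ahead of phase 2 by
-- the already-taken sheet-break decision for the currently open shelf
lemma pack_eq (L A : Int) : ∀ (rest shelf : List (Int × Int)) (x h : Int)
    (C : List (List (Int × Int))) (S : List (Int × Int)) (y : Int),
    rest.Pairwise (fun p q : Int × Int => q.2 ≤ p.2) →
    (shelf = [] → S = [] ∧ y = 0 ∧ x = 0 ∧ h = 0) →
    (shelf ≠ [] → (∀ p ∈ rest, p.2 ≤ h) ∧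
      (if y + (shelf.headD (0,0)).2 > A then (0:Int) else y) + h ≤ A) →
    flushA (rest.foldl (shelfAStep L A)
      (if shelf ≠ [] ∧ y + (shelf.headD (0,0)).2 > A then C ++ [S] else C,
       (if shelf ≠ [] ∧ y + (shelf.headD (0,0)).2 > A then [] else S) ++ shelf,
       x,
       if shelf ≠ [] ∧ y + (shelf.headD (0,0)).2 > A then 0 else y,
       h))
    = flushB ((buildShelves L A rest shelf x h).foldl (packStep A) (C, S, y)) := by
  intro rest
  induction rest with
  | nil =>
    intro shelf x h C S y _ hempty _
    cases shelf with
    | nil =>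
      obtain ⟨hS, hy, _, _⟩ := hempty rfl
      subst hS hy
      simp [buildShelves, flushA, flushB]
    | cons q t =>
      by_cases hd : y + q.2 > A
      · simp [buildShelves, flushA, flushB, packStep, hd]
      · simp [buildShelves, flushA, flushB, packStep, hd]
  | cons p rest ih =>
    intro shelf x h C S y hsort hempty hne
    obtain ⟨hp, hsort'⟩ := List.pairwise_cons.mp hsort
    rw [List.foldl_cons]
    by_cases hov : p.1 > L ∨ p.2 > A
    · -- oversized piece: close shelf (if any), emit isolated sheet, reset
      cases shelf with
      | nil =>
        obtain ⟨hS, hy, hx, hh⟩ := hempty rfl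
        subst hS hy hx hh
        have H := ih [] 0 0 (C ++ [[p]]) [] 0 hsort' (by simp) (by simp)
        simpa [shelfAStep, buildShelves, hov, packStep] using H
      | cons q t =>
        have H := ih [] 0 0
          ((if y + q.2 > A then C ++ [S] else C) ++
            [((if y + q.2 > A then ([] : List (Int × Int)) else S) ++ q :: t)] ++ [[p]])
          [] 0 hsort' (by simp) (by simp)
        simpa [shelfAStep, buildShelves, hov, packStep, List.append_assoc] using H
    · -- piece fits in a sheet
      have hnov : ¬ (L < p.1 ∨ A < p.2) := by omega
      by_cases hw : h ≠ 0 ∧ x + p.1 > L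
      · -- width overflow: close the shelf, start a new one with p
        cases shelf with
        | nil =>
          obtain ⟨_, _, _, hh⟩ := hempty rfl
          exact absurd hh hw.1
        | cons q t =>
          obtain ⟨hall, hyh⟩ := hne (by simp)
          simp only [List.headD_cons] at hyh
          have H := ih [p] p.1 p.2
            (if y + q.2 > A then C ++ [S] else C)
            ((if y + q.2 > A then ([] : List (Int × Int)) else S) ++ q :: t)
            ((if y + q.2 > A then (0 : Int) else y) + h)
            hsort' (by simp)
            (by
              intro _
              refine ⟨hp, ?_⟩
              simp only [List.headD_cons]
              split_ifs <;> omega)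
          simpa [shelfAStep, buildShelves, hw, hnov, packStep, List.append_assoc] using H
      · -- piece joins the current shelf
        cases shelf with
        | nil =>
          obtain ⟨hS, hy, hx, hh⟩ := hempty rfl
          subst hS hy hx hh
          have hchk : ¬ (A < (0 : Int) + p.2) := by omega
          have H := ih [p] (0 + p.1) p.2 C [] 0 hsort' (by simp)
            (by
              intro _
              refine ⟨hp, ?_⟩
              simp only [List.headD_cons]
              split_ifs <;> omega)
          simpa [shelfAStep, buildShelves, hw, hchk, hnov, packStep] using H
        | cons q t =>
          obtain ⟨hall, hyh⟩ := hne (by simp)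
          simp only [List.headD_cons] at hyh
          have hpp : p.2 ≤ h := hall p (by simp)
          have hchk : ¬ (A < (if A < y + q.2 then (0 : Int) else y) + p.2) := by
            split_ifs at hyh ⊢ <;> omega
          have H := ih (q :: (t ++ [p])) (x + p.1) (if h = 0 then p.2 else h) C S y hsort'
            (by simp)
            (by
              intro _
              constructor
              · intro r hr
                have h1 := hall r (by simp [hr])
                have h2 := hp r hr
                split_ifs <;> omega
              · simp only [List.headD_cons]
                split_ifs at hyh ⊢ <;> omega)
          simpa [shelfAStep, buildShelves, hw, hchk, hnov, packStep, List.append_assoc] using H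

theorem shelf_2d_py_spec : Claim_equal_shelf_2d_py := by
  intro pecas L A _
  unfold Spec_shelf_2d_py
  have H := pack_eq L A (PySem.List.sorted2 pecas (fun q => -q.2) (fun q => -q.1))
    [] 0 0 [] [] 0 (sorted2_heights pecas) (by simp) (by simp)
  simp only [flushA, flushB, ne_eq, not_true_eq_false, false_and, if_false,
    List.append_nil] at H
  simp only [shelf_2d_py, shelf_2d_py_alt]
  rw [H]
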